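-- pv_equiv track=rewrite | github.com/shudeepta-gh/Academic-courses | CSE221/python/lab03/TaskB.py | comparing_pairs
-- ===== SOURCE A (Python) =====
-- import math
-- import bisect
--
-- def comparing_pairs(left,right):
--     count = 0
--     abs_right = []
--     for i in range(len(right)):
--         abs_right.append(abs(right[i]))
--
--     abs_sorted_right = sorted(abs_right)
--
--     for i in left:
--         if(i>0):
--             root = math.sqrt(i)
--             count+=bisect.bisect_left(abs_sorted_right,root)
--
--     i=j=0
--     final=[]
--
--     while(i<len(left) and j<len(right)):
--         if(abs(left[i])<=abs(right[j])):
--             final.append(left[i])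
--             i+=1
--
--         else:
--             final.append(right[j])
--             j+=1
--
--     final.extend(left[i:])
--     final.extend(right[j:])
--     return final,count
-- ===== SOURCE B (Python) =====
-- import math
--
-- def comparing_pairs(left, right):
--     # Count: instead of a bisect_left binary search per left element, sort the
--     # sqrt thresholds once and sweep both sorted sequences with one pointer.
--     abs_sorted_right = sorted(abs(v) for v in right)
--     roots = sorted(math.sqrt(i) for i in left if i > 0)
--     n = len(abs_sorted_right)
--     count = 0
--     j = 0
--     for r in roots:
--         while j < n and abs_sorted_right[j] < r:
--             j += 1
--         count += j
--     # Merge by absolute value (two-pointer, left wins ties), as in A.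
--     i = k = 0
--     final = []
--     while i < len(left) and k < len(right):
--         if abs(left[i]) <= abs(right[k]):
--             final.append(left[i])
--             i += 1
--         else:
--             final.append(right[k])
--             k += 1
--     final.extend(left[i:])
--     final.extend(right[k:])
--     return final, count
-- ===== Notes on version B (the rewrite author's own statement) =====
-- stated objective: alternative
-- what changed: The pair count is computed by one merge-style sweep over the sorted sqrt thresholds and the sorted absolute right values instead of a bisect_left binary search per left element; the two-pointer merge is kept.
import Mathlib
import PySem

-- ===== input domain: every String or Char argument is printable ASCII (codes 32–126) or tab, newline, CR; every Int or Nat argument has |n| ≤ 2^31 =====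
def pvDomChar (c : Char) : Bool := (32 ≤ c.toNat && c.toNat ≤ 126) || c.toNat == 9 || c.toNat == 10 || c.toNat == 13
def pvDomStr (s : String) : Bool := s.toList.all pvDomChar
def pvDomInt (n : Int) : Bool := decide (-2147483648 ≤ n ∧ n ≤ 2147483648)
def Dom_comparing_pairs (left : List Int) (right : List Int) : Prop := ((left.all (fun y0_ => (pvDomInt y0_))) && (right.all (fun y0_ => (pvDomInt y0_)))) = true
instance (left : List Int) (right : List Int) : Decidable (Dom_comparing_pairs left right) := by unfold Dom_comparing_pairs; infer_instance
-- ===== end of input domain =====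

-- B computes the count with one sorted sweep instead of per-element binary searches (alternative decomposition; merge unchanged).

-- ===== PORT A =====
-- bisect.bisect_left(abs_sorted_right, math.sqrt(i)) ported by its specification on the
-- sorted list: the number of leading elements v with v < sqrt(i).  The float comparison
-- v < math.sqrt(i) is exact as v*v < i for 0 ≤ v and 0 < i ≤ 2^31 (the Dom bound).
def bisectSqrt (xs : List Int) (i : Int) : Nat :=
  (xs.takeWhile (fun v => decide (v * v < i))).length

-- the while-merge shared verbatim by both Pythons (two pointers i, j; left wins ties);
-- final.extend(left[i:]) / .extend(right[j:]) are the nonnegative-index slices = drop.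
def mergeLoop (left right : List Int) (i j : Nat) (final : List Int) : List Int :=
  if h : i < left.length ∧ j < right.length then
    if |left[i]'h.1| ≤ |right[j]'h.2| then
      mergeLoop left right (i + 1) j (final ++ [left[i]'h.1])
    else
      mergeLoop left right i (j + 1) (final ++ [right[j]'h.2])
  else
    final ++ left.drop i ++ right.drop j
termination_by left.length - i + (right.length - j)
decreasing_by all_goals omega

def comparing_pairs (left : List Int) (right : List Int) : List Int × Int :=
  -- for i in range(len(right)): abs_right.append(abs(right[i]))
  let abs_right : List Int :=
    (PySem.List.pyRange 0 (right.length : Int) 1).foldl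
      (fun acc k => acc ++ [|PySem.List.pyGetD right k 0|]) []
  let abs_sorted_right := PySem.List.sorted abs_right (fun x => x) false
  let count : Int :=
    left.foldl (fun c i => if 0 < i then c + (bisectSqrt abs_sorted_right i : Int) else c) 0
  (mergeLoop left right 0 0 [], count)

-- ===== PORT B =====
-- the inner while loop: advance the pointer j over the (sorted) remaining suffix
-- while abs_sorted_right[j] < r, i.e. (exact on Dom, see above) v*v < p.
def advancePtr (rem : List Int) (p : Int) (j : Nat) : List Int × Nat :=
  match rem with
  | [] => ([], j)
  | v :: t => if v * v < p then advancePtr t p (j + 1) else (v :: t, j)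

-- for r in roots: advance j, then count += j
def sweep (ps : List Int) (rem : List Int) (j : Nat) (c : Int) : Int :=
  match ps with
  | [] => c
  | p :: ps' =>
    let rj := advancePtr rem p j
    sweep ps' rj.1 rj.2 (c + (rj.2 : Int))

def comparing_pairs_alt (left : List Int) (right : List Int) : List Int × Int :=
  let abs_sorted_right := PySem.List.sorted (right.map (fun v => |v|)) (fun x => x) false
  -- sorted(math.sqrt(i) for i in left if i > 0): sqrt is monotone, so sort the i's
  let roots := PySem.List.sorted (left.filter (fun i => decide (0 < i))) (fun x => x) false
  let count := sweep roots abs_sorted_right 0 0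
  (mergeLoop left right 0 0 [], count)

-- ===== PRECONDITION & SPEC =====
def Spec_comparing_pairs (left : List Int) (right : List Int) (out : List Int × Int) : Prop := out = comparing_pairs_alt left right
instance (left : List Int) (right : List Int) (out : List Int × Int) : Decidable (Spec_comparing_pairs left right out) := by unfold Spec_comparing_pairs; infer_instance

-- ===== CLAIM (what is proved, stated in full; the proofs are below) =====
def Claim_equal_comparing_pairs : Prop := ∀ (left : List Int) (right : List Int), Dom_comparing_pairs left right → Spec_comparing_pairs left right (comparing_pairs left right)

-- ===== LEMMAS AND PROOFS =====

theorem advancePtr_eq (rem : List Int) (p : Int) (j : Nat) :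
    advancePtr rem p j =
      (rem.dropWhile (fun v => decide (v * v < p)),
       j + (rem.takeWhile (fun v => decide (v * v < p))).length) := by
  induction rem generalizing j with
  | nil => simp [advancePtr]
  | cons v t ih =>
    by_cases h : v * v < p
    · simp [advancePtr, h, ih]
      omega
    · simp [advancePtr, h]

theorem takeWhile_append_of_all {p : Int → Bool} {l₁ l₂ : List Int}
    (h : ∀ v ∈ l₁, p v = true) :
    (l₁ ++ l₂).takeWhile p = l₁ ++ l₂.takeWhile p := by
  induction l₁ with
  | nil => simp
  | cons a t ih =>
    simp [h a (by simp)]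
    exact ih (fun v hv => h v (by simp [hv]))

theorem sweep_eq (arr : List Int) (ps done rem : List Int) (c : Int)
    (harr : arr = done ++ rem)
    (hps : ps.Pairwise (fun a b => a ≤ b))
    (hdone : ∀ v ∈ done, ∀ p ∈ ps, v * v < p) :
    sweep ps rem done.length c =
      c + ((ps.map (fun p => ((bisectSqrt arr p : Nat) : Int))).sum) := by
  induction ps generalizing done rem c with
  | nil => simp [sweep]
  | cons p ps' ih =>
    have hple : ∀ q ∈ ps', p ≤ q := by
      intro q hq; exact (List.pairwise_cons.mp hps).1 q hq
    have hps' := (List.pairwise_cons.mp hps).2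
    simp only [sweep, advancePtr_eq]
    set tk := rem.takeWhile (fun v => decide (v * v < p)) with htk
    set dr := rem.dropWhile (fun v => decide (v * v < p)) with hdr
    have hremsplit : rem = tk ++ dr := (List.takeWhile_append_dropWhile).symm
    have hdoneall : ∀ v ∈ done, (fun v => decide (v * v < p)) v = true := by
      intro v hv; simp [hdone v hv p (by simp)]
    have hbs : bisectSqrt arr p = done.length + tk.length := by
      unfold bisectSqrt
      rw [harr, takeWhile_append_of_all hdoneall, htk]
      simp
    have hdone' : ∀ v ∈ done ++ tk, ∀ q ∈ ps', v * v < q := by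
      intro v hv q hq
      rcases List.mem_append.mp hv with h1 | h1
      · exact hdone v h1 q (by simp [hq])
      · have : v * v < p := by
          have := List.mem_takeWhile_imp (htk ▸ h1)
          simpa using this
        exact lt_of_lt_of_le this (hple q hq)
    have harr' : arr = (done ++ tk) ++ dr := by
      rw [harr, hremsplit, List.append_assoc]
    have := ih (done ++ tk) dr (c + ((done.length + tk.length : Nat) : Int)) harr' hps' hdone'
    simp only [List.length_append] at this ⊢
    rw [this]
    simp [hbs]
    ring

-- the A-side count fold is the sum over the positive elements
theorem foldl_count_eq (xs : List Int) (f : Int → Int) (c : Int) :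
    xs.foldl (fun c i => if 0 < i then c + f i else c) c =
      c + ((xs.filter (fun i => decide (0 < i))).map f).sum := by
  induction xs generalizing c with
  | nil => simp
  | cons a t ih =>
    by_cases h : 0 < a
    · simp [List.foldl_cons, h, ih]
      ring
    · simp [List.foldl_cons, h, ih]

-- ===== VERDICT (by name: the statement is the Claim_ definition above) =====
theorem comparing_pairs_spec : Claim_equal_comparing_pairs := by
  intro left right _
  unfold Spec_comparing_pairs comparing_pairs comparing_pairs_alt
  dsimp only
  -- the abs_right loop builds right.map abs
  have habs :
      (PySem.List.pyRange 0 (right.length : Int) 1).foldl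
        (fun acc k => acc ++ [|PySem.List.pyGetD right k 0|]) []
        = right.map (fun v => |v|) := by
    rw [PySem.List.foldl_append_singleton_eq_map]
    have : (fun k => |PySem.List.pyGetD right k 0|)
        = (fun v => |v|) ∘ (fun k => PySem.List.pyGetD right k 0) := rfl
    rw [this, ← List.map_map]
    have hlen : ((right.length : Int)) = PySem.List.len right := by
      simp [PySem.List.len]
    rw [hlen, PySem.List.map_pyGetD_pyRange_zero]
    simp
  rw [habs]
  set arr := PySem.List.sorted (right.map (fun v => |v|)) (fun x => x) false with harr
  set roots := PySem.List.sorted (left.filter (fun i => decide (0 < i))) (fun x => x) false with hroots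
  have hsweep : sweep roots arr 0 0 =
      0 + ((roots.map (fun p => ((bisectSqrt arr p : Nat) : Int))).sum) := by
    have := sweep_eq arr roots [] arr 0 rfl
      (by
        have := PySem.List.sorted_pairwise (left.filter (fun i => decide (0 < i))) (fun x => x)
        simpa using this)
      (by intro v hv; simp at hv)
    simpa using this
  have hperm : roots.Perm (left.filter (fun i => decide (0 < i))) :=
    PySem.List.sorted_perm _ _ _
  have hsum :
      ((left.filter (fun i => decide (0 < i))).map
          (fun p => ((bisectSqrt arr p : Nat) : Int))).sum
        = ((roots.map (fun p => ((bisectSqrt arr p : Nat) : Int))).sum) :=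
    (hperm.map _).sum_eq.symm
  rw [foldl_count_eq, hsweep, hsum]
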